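-- pv_equiv track=rewrite | github.com/takapdayon/atcoder | abc/AtCoderBeginnerContest093/B.py | Small_and_Large
-- ===== SOURCE A (Python) =====
-- def Small_and_Large(a , b , k):
--
--     ans = []
--
--     for i in range(k):
--         if a + i <= b:
--             ans.append(a + i)
--         if b - i >= a:
--             ans.append(b - i)
--
--     return sorted(set(ans))
-- ===== SOURCE B (Python) =====
-- def Small_and_Large(a, b, k):
--     if k <= 0 or a > b:
--         return []
--     lo_end = min(a + k - 1, b)
--     hi_start = max(b - k + 1, a)
--     if hi_start <= lo_end + 1:
--         return list(range(a, b + 1))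
--     return list(range(a, lo_end + 1)) + list(range(hi_start, b + 1))
-- ===== Notes on version B (the rewrite author's own statement) =====
-- stated objective: faster
-- what changed: Replaces the k-iteration append loop followed by sorted(set(...)) with direct construction of the two clamped contiguous ranges [a, min(a+k-1,b)] and [max(b-k+1,a), b], merged when they touch or overlap, so no sorting or dedup is needed.
import Mathlib
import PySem

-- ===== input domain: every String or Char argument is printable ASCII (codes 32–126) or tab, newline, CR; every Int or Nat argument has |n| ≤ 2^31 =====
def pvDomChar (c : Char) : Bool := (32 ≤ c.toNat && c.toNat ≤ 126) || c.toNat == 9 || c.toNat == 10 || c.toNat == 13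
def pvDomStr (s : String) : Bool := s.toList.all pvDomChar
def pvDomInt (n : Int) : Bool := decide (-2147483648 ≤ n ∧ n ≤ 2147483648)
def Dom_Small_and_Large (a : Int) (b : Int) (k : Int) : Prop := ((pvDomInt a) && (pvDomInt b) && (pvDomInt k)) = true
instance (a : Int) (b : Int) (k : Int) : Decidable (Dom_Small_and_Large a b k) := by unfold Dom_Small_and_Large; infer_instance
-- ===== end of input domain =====

-- B replaces the k-iteration loop + sort by directly emitting the merged clamped ranges [a, min(a+k-1,b)] and [max(b-k+1,a), b]; objective: faster (O(output) vs O(k log k)).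


-- ===== PORT A =====
def Small_and_Large (a : Int) (b : Int) (k : Int) : List Int :=
  let ans : List Int :=
    (PySem.List.pyRange 0 k 1).foldl (fun ans i =>
      let ans := if a + i ≤ b then ans ++ [a + i] else ans
      if b - i ≥ a then ans ++ [b - i] else ans) []
  PySem.List.sorted (PySem.Set.ofList ans) (fun x => x) false

-- ===== PORT B =====
def Small_and_Large_alt (a : Int) (b : Int) (k : Int) : List Int :=
  if k ≤ 0 ∨ a > b then []
  else
    let loEnd := min (a + k - 1) b
    let hiStart := max (b - k + 1) a
    if hiStart ≤ loEnd + 1 then PySem.List.pyRange a (b + 1) 1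
    else PySem.List.pyRange a (loEnd + 1) 1 ++ PySem.List.pyRange hiStart (b + 1) 1

-- ===== PRECONDITION & SPEC =====
def Spec_Small_and_Large (a : Int) (b : Int) (k : Int) (out : List Int) : Prop := out = Small_and_Large_alt a b k
instance (a : Int) (b : Int) (k : Int) (out : List Int) : Decidable (Spec_Small_and_Large a b k out) := by unfold Spec_Small_and_Large; infer_instance

-- ===== CLAIM (what is proved, stated in full; the proofs are below) =====
def Claim_equal_Small_and_Large : Prop := ∀ (a : Int) (b : Int) (k : Int), Dom_Small_and_Large a b k → Spec_Small_and_Large a b k (Small_and_Large a b k)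

-- ===== LEMMAS AND PROOFS =====

-- A's loop, rewritten as a flatMap of per-iteration contributions
theorem ans_eq_flatMap (a b k : Int) :
    (PySem.List.pyRange 0 k 1).foldl (fun ans i =>
      let ans := if a + i ≤ b then ans ++ [a + i] else ans
      if b - i ≥ a then ans ++ [b - i] else ans) [] =
    (PySem.List.pyRange 0 k 1).flatMap (fun i =>
      (if a + i ≤ b then [a + i] else []) ++ (if b - i ≥ a then [b - i] else [])) := by
  have hfun : (fun (ans : List Int) i =>
      let ans := if a + i ≤ b then ans ++ [a + i] else ans
      if b - i ≥ a then ans ++ [b - i] else ans) =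
      fun acc i => acc ++ ((if a + i ≤ b then [a + i] else []) ++ (if b - i ≥ a then [b - i] else [])) := by
    funext acc i
    by_cases h1 : a + i ≤ b <;> by_cases h2 : b - i ≥ a <;> simp [h1, h2]
  rw [hfun, PySem.List.foldl_append_eq_flatMap]
  simp

-- membership in A's accumulated list
theorem mem_ans (a b k x : Int) :
    (x ∈ (PySem.List.pyRange 0 k 1).foldl (fun ans i =>
      let ans := if a + i ≤ b then ans ++ [a + i] else ans
      if b - i ≥ a then ans ++ [b - i] else ans) []) ↔
    (a ≤ x ∧ x ≤ b ∧ (x < a + k ∨ b - k < x)) := by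
  rw [ans_eq_flatMap]
  simp only [List.mem_flatMap, List.mem_append, PySem.List.mem_pyRange_one]
  constructor
  · rintro ⟨i, ⟨hi0, hik⟩, h⟩
    rcases h with h | h <;> · split at h <;> simp at h <;> try omega
  · rintro ⟨hax, hxb, h⟩
    rcases h with h | h
    · exact ⟨x - a, by omega, Or.inl (by rw [if_pos (by omega)]; simp)⟩
    · exact ⟨b - x, by omega, Or.inr (by rw [if_pos (by omega)]; simp)⟩

-- membership in B's output
theorem mem_alt (a b k x : Int) :
    x ∈ Small_and_Large_alt a b k ↔ (a ≤ x ∧ x ≤ b ∧ (x < a + k ∨ b - k < x)) := by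
  unfold Small_and_Large_alt
  dsimp only
  split
  · simp; omega
  · next hn =>
    rw [not_or, not_le, not_lt] at hn
    split <;>
      simp only [List.mem_append, PySem.List.mem_pyRange_one] <;> omega

theorem pairwise_alt (a b k : Int) : (Small_and_Large_alt a b k).Pairwise (· < ·) := by
  unfold Small_and_Large_alt
  dsimp only
  split
  · simp
  · split
    · exact PySem.List.pairwise_lt_pyRange_one a (b + 1)
    · next h =>
      apply List.pairwise_append.2
      refine ⟨PySem.List.pairwise_lt_pyRange_one _ _, PySem.List.pairwise_lt_pyRange_one _ _, ?_⟩
      intro x hx y hy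
      rw [PySem.List.mem_pyRange_one] at hx hy
      omega

theorem nodup_alt (a b k : Int) : (Small_and_Large_alt a b k).Nodup :=
  (pairwise_alt a b k).imp (fun h => ne_of_lt h)

-- ===== VERDICT (by name: the statement is the Claim_ definition above) =====
theorem Small_and_Large_spec : Claim_equal_Small_and_Large := by
  intro a b k _
  unfold Spec_Small_and_Large
  show Small_and_Large a b k = _
  unfold Small_and_Large
  apply PySem.List.sorted_eq_of_perm_of_pairwise_lt
  · rw [List.perm_ext_iff_of_nodup (nodup_alt a b k) (PySem.Set.nodup_ofList _)]
    intro x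
    rw [PySem.Set.mem_ofList, mem_alt, mem_ans]
  · exact pairwise_alt a b k
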